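-- pv_equiv track=rewrite | github.com/fenghaitao/simics-7-packages-2025-38-linux64 | simics-7.57.0/linux64/lib/python-py3/simmod/mmc_card_comp/mmc_card_comp.py | byteize
-- ===== SOURCE A (Python) =====
-- def byteize(bit_offset, bit_size):
--     """Split up bit offsets into a vector of byte-aligned pieces with mask."""
--     end_bit = bit_offset + bit_size
--     while bit_offset < end_bit:
--         min_bit = bit_offset & 7
--         bit_size = 8 - min_bit
--         if bit_offset + bit_size > end_bit:
--             bit_size = end_bit - bit_offset
--         min_mask = 0xFF << min_bit
--         max_mask = 0xFF >> (8 - bit_size - min_bit)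
--         bit_mask = min_mask & max_mask
--         yield (bit_offset, bit_size, bit_mask)
--         bit_offset += bit_size
-- ===== SOURCE B (Python) =====
-- def byteize(bit_offset, bit_size):
--     """Split up bit offsets into a vector of byte-aligned pieces with mask."""
--     end = bit_offset + bit_size
--     if bit_offset >= end:
--         return
--     next_boundary = ((bit_offset + 7) >> 3) * 8   # first byte boundary >= bit_offset
--     full_end = (end >> 3) * 8                     # last byte boundary <= end
--     # head: partial piece up to the first byte boundary (or up to end)
--     min_bit = bit_offset & 7
--     if min_bit:
--         hi = min(next_boundary, end)
--         sz = hi - bit_offset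
--         yield (bit_offset, sz, (0xFF << min_bit) & (0xFF >> (8 - sz - min_bit)))
--         if hi == end:
--             return
--         start_full = next_boundary
--     else:
--         start_full = bit_offset
--     # body: whole bytes, constant mask
--     for i in range((full_end - start_full) // 8):
--         yield (start_full + 8 * i, 8, 0xFF)
--     # tail: partial piece after the last byte boundary
--     if full_end < end:
--         yield (full_end, end - full_end, 0xFF >> (8 - (end - full_end)))
-- ===== Notes on version B (the rewrite author's own statement) =====
-- stated objective: alternative
-- what changed: Replaced A's uniform cursor loop (which recomputes both shift masks for every piece) by a staged head/body/tail decomposition: the byte boundaries are computed once in closed form, an optional unaligned head fragment and tail fragment are emitted explicitly, and the whole bytes in between are emitted by a counted loop with the constant mask 0xFF.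
import Mathlib
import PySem

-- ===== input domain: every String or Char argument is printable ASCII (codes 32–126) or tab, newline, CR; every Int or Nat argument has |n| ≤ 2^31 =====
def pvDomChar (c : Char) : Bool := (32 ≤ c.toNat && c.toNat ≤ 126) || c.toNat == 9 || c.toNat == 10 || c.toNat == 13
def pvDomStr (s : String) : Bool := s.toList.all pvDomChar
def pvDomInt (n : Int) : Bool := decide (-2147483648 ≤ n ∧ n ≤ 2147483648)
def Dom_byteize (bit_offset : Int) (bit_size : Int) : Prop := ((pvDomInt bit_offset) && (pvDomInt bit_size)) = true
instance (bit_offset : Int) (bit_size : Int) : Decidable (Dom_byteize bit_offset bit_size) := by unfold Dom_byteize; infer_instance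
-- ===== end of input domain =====

-- B replaces A's uniform cursor loop by a staged head/body/tail decomposition: boundaries
-- computed once in closed form, constant-mask whole bytes in the middle (objective: alternative).

-- Bracket for Python's `x >> 3` (floor shift), used by port A's termination and the proofs.
theorem sr3_bracket (a : Int) : (8:Int) * (a >>> 3) ≤ a ∧ a < 8 * (a >>> 3) + 8 := by
  cases a with
  | ofNat n =>
      have h : (Int.ofNat n) >>> 3 = Int.ofNat (n >>> 3) := rfl
      have h2 : n >>> 3 = n / 8 := by
        have := Nat.shiftRight_eq_div_pow n 3; norm_num at this; exact this
      rw [h, h2]; simp only [Int.ofNat_eq_natCast]; constructor <;> omega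
  | negSucc n =>
      have h : (Int.negSucc n) >>> 3 = Int.negSucc (n >>> 3) := rfl
      have h2 : n >>> 3 = n / 8 := by
        have := Nat.shiftRight_eq_div_pow n 3; norm_num at this; exact this
      rw [h, h2]; constructor <;> omega

-- Python's `a & 7` equals `a - 8 * (a >> 3)` (the low three bits), for every Int.
theorem band_seven (a : Int) : PySem.Int.band a 7 = a - 8 * (a >>> 3) := by
  have hmask : ∀ m : Nat, m &&& 7 = m % 8 := fun m => by
    have := Nat.and_two_pow_sub_one_eq_mod m 3; norm_num at this; exact this
  cases a with
  | ofNat n =>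
      have h1 : PySem.Int.band (Int.ofNat n) 7 = ((n &&& 7 : Nat) : Int) := by
        rw [PySem.Int.band_of_nonneg (by exact Int.natCast_nonneg n) (by norm_num)]
        have h7 : Int.toNat 7 = 7 := rfl
        have hn : (Int.ofNat n).toNat = n := rfl
        rw [h7, hn]
      have h2 : (Int.ofNat n) >>> 3 = Int.ofNat (n >>> 3) := rfl
      have h4 : n >>> 3 = n / 8 := by
        have := Nat.shiftRight_eq_div_pow n 3; norm_num at this; exact this
      rw [h1, h2, hmask n, h4]
      simp only [Int.ofNat_eq_natCast]
      omega
  | negSucc n =>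
      have h1 : PySem.Int.band (Int.negSucc n) 7 = ((7 - (7 &&& n) : Nat) : Int) := by
        show (if 0 ≤ Int.negSucc n then _ else _) = _
        rw [if_neg (by omega), if_pos (by norm_num : (0:Int) ≤ 7)]
        have h7 : Int.toNat 7 = 7 := rfl
        have hn : (-(Int.negSucc n) - 1).toNat = n := by omega
        rw [h7, hn]
      have h2 : (Int.negSucc n) >>> 3 = Int.negSucc (n >>> 3) := rfl
      have h3 : 7 &&& n = n % 8 := by rw [Nat.land_comm]; exact hmask n
      have h4 : n >>> 3 = n / 8 := by
        have := Nat.shiftRight_eq_div_pow n 3; norm_num at this; exact this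
      rw [h1, h2, h3, h4]
      omega

-- ===== PORT A =====
-- the while-loop of A: state is the cursor `bit_offset` (here `off`); `end_bit` is fixed
def byteizeGo (end_bit : Int) (off : Int) : List (Int × Int × Int) :=
  if off < end_bit then
    let min_bit := PySem.Int.band off 7
    let bs0 := 8 - min_bit
    let bs := if off + bs0 > end_bit then end_bit - off else bs0
    let min_mask := (255 : Int) <<< min_bit.toNat   -- 0xFF << min_bit; shift amount is ≥ 0
    let max_mask := (255 : Int) >>> (8 - bs - min_bit).toNat   -- 0xFF >> (8-bit_size-min_bit); ≥ 0
    let bit_mask := PySem.Int.band min_mask max_mask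
    (off, bs, bit_mask) :: byteizeGo end_bit (off + bs)
  else []
termination_by (end_bit - off).toNat
decreasing_by
  have hb := band_seven off
  have hs := sr3_bracket off
  simp only [gt_iff_lt]
  split <;> omega

def byteize (bit_offset : Int) (bit_size : Int) : List (Int × Int × Int) :=
  byteizeGo (bit_offset + bit_size) bit_offset

-- ===== PORT B =====
-- body of B: the whole bytes between the two boundaries, each with the constant mask 0xFF
-- (the Python `for i in range((full_end - start_full) // 8): yield (start_full + 8*i, 8, 0xFF)`)
def byteizeAltFull (start_full : Int) (full_end : Int) : List (Int × Int × Int) :=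
  (PySem.List.pyRange 0 (PySem.Int.floordiv (full_end - start_full) 8) 1).map
    (fun i => (start_full + 8 * i, 8, 255))

-- tail of B: the partial piece after the last byte boundary, if any
def byteizeAltTail (full_end : Int) (endB : Int) : List (Int × Int × Int) :=
  if full_end < endB then
    [(full_end, endB - full_end, (255 : Int) >>> (8 - (endB - full_end)).toNat)]
  else []

def byteize_alt (bit_offset : Int) (bit_size : Int) : List (Int × Int × Int) :=
  let endB := bit_offset + bit_size
  if bit_offset < endB then   -- Python: `if bit_offset >= end: return`, inverted
    let next_boundary := ((bit_offset + 7) >>> 3) * 8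
    let full_end := (endB >>> 3) * 8
    let min_bit := PySem.Int.band bit_offset 7
    if min_bit ≠ 0 then
      let hi := min next_boundary endB
      let sz := hi - bit_offset
      let head := (bit_offset, sz,
        PySem.Int.band ((255 : Int) <<< min_bit.toNat) ((255 : Int) >>> (8 - sz - min_bit).toNat))
      if hi = endB then [head]
      else head :: (byteizeAltFull next_boundary full_end ++ byteizeAltTail full_end endB)
    else byteizeAltFull bit_offset full_end ++ byteizeAltTail full_end endB
  else []

-- ===== PRECONDITION & SPEC =====
def Spec_byteize (bit_offset : Int) (bit_size : Int) (out : List (Int × Int × Int)) : Prop := out = byteize_alt bit_offset bit_size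
instance (bit_offset : Int) (bit_size : Int) (out : List (Int × Int × Int)) : Decidable (Spec_byteize bit_offset bit_size out) := by unfold Spec_byteize; infer_instance

-- ===== CLAIM (what is proved, stated in full; the proofs are below) =====
def Claim_equal_byteize : Prop := ∀ (bit_offset : Int) (bit_size : Int), Dom_byteize bit_offset bit_size → Spec_byteize bit_offset bit_size (byteize bit_offset bit_size)

-- ===== LEMMAS AND PROOFS =====

-- the body list is empty when the boundaries have crossed
theorem full_nil (start_full full_end : Int) (h : full_end ≤ start_full) :
    byteizeAltFull start_full full_end = [] := by
  unfold byteizeAltFull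
  have hq : PySem.Int.floordiv (full_end - start_full) 8 < 1 := by
    rw [PySem.Int.floordiv_lt_iff_lt_mul (by norm_num)]; omega
  rw [PySem.List.pyRange_one]
  have h0 : (PySem.Int.floordiv (full_end - start_full) 8 - 0).toNat = 0 := by omega
  rw [h0]; simp

-- peeling one whole byte off the front of the body list
theorem full_cons (start_full full_end : Int) (k z : Int)
    (hk : start_full = 8 * k) (hz : full_end = 8 * z) (h : start_full + 8 ≤ full_end) :
    byteizeAltFull start_full full_end = (start_full, 8, 255) :: byteizeAltFull (start_full + 8) full_end := by
  unfold byteizeAltFull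
  have hq1 : PySem.Int.floordiv (full_end - start_full) 8 = z - k := by
    rw [PySem.Int.floordiv_eq_iff_of_pos (by norm_num)]; omega
  have hq2 : PySem.Int.floordiv (full_end - (start_full + 8)) 8 = z - k - 1 := by
    rw [PySem.Int.floordiv_eq_iff_of_pos (by norm_num)]; omega
  rw [hq1, hq2, PySem.List.pyRange_one, PySem.List.pyRange_one]
  have h1 : (z - k - 0).toNat = (z - k - 1 - 0).toNat + 1 := by omega
  rw [h1, List.range_succ_eq_map]
  simp only [List.map_cons, List.map_map]
  refine congrArg₂ _ (by norm_num) ?_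
  apply List.map_congr_left
  intro i _
  simp only [Function.comp_apply, Prod.mk.injEq, and_true]
  push_cast; ring

-- A's loop from a byte-aligned cursor produces exactly B's body followed by B's tail.
theorem go_aligned (endB : Int) : ∀ (n : Nat) (off : Int), (endB - off).toNat ≤ n →
    off ≤ endB → (∃ k : Int, off = 8 * k) →
    byteizeGo endB off =
      byteizeAltFull off ((endB >>> 3) * 8) ++ byteizeAltTail ((endB >>> 3) * 8) endB := by
  intro n
  induction n with
  | zero =>
      intro off hf hle ⟨k, hk⟩
      have heq : off = endB := by omega
      have h2 := sr3_bracket endB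
      have hz : (endB >>> 3) * 8 = endB := by omega
      rw [byteizeGo, if_neg (by omega), hz, full_nil _ _ (by omega)]
      unfold byteizeAltTail
      rw [if_neg (by omega)]
      rfl
  | succ n ih =>
      intro off hf hle ⟨k, hk⟩
      by_cases hlt : off < endB
      · have hband := band_seven off
        have h1 := sr3_bracket off
        have h2 := sr3_bracket endB
        have hmb : PySem.Int.band off 7 = 0 := by omega
        rw [byteizeGo, if_pos hlt]
        simp only [hmb, gt_iff_lt]
        by_cases hcase : off + 8 ≤ endB
        · -- a full byte: emit (off, 8, 0xFF) and recurse at the next boundary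
          rw [if_neg (by omega)]
          have hm : PySem.Int.band ((255:Int) <<< (Int.toNat 0)) ((255:Int) >>> (Int.toNat (8 - (8 - 0) - 0))) = 255 := by decide
          have hz : ∃ z : Int, (endB >>> 3) * 8 = 8 * z := ⟨endB >>> 3, by ring⟩
          obtain ⟨z, hzz⟩ := hz
          rw [full_cons off ((endB >>> 3) * 8) k z hk hzz (by omega)]
          simp only [sub_zero]
          have hm : PySem.Int.band ((255:Int) <<< (Int.toNat 0)) ((255:Int) >>> ((8 - 8 : Int)).toNat) = 255 := by decide
          rw [hm, List.cons_append]
          refine congrArg₂ _ rfl ?_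
          exact ih (off + 8) (by omega) (by omega) ⟨k + 1, by omega⟩
        · -- the interval ends inside this byte: emit the tail piece and stop
          rw [if_pos (by omega)]
          have he : off + (endB - off) = endB := by omega
          rw [he, byteizeGo, if_neg (by omega)]
          have hz : (endB >>> 3) * 8 = off := by omega
          rw [hz, full_nil _ _ (le_refl _)]
          unfold byteizeAltTail
          rw [if_pos (by omega)]
          simp only [List.nil_append]
          refine congrArg₂ _ ?_ rfl
          refine congrArg₂ _ rfl ?_
          refine congrArg₂ _ rfl ?_
          -- the masks agree: 0xFF << 0 & 0xFF >> (8-d-0)  =  0xFF >> (8-d), for 1 ≤ d ≤ 7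
          have hd1 : (1:Int) ≤ endB - off := by omega
          have hd2 : endB - off ≤ 7 := by omega
          set d := endB - off with hdd
          clear_value d
          interval_cases d <;> decide
      · have h2 := sr3_bracket endB
        have heq : off = endB := by omega
        have hz : (endB >>> 3) * 8 = endB := by omega
        rw [byteizeGo, if_neg (by omega), hz, full_nil _ _ (by omega)]
        unfold byteizeAltTail
        rw [if_neg (by omega)]
        rfl

-- ===== VERDICT (by name: the statement is the Claim_ definition above) =====
theorem byteize_spec : Claim_equal_byteize := by
  intro off sz _
  show byteize off sz = byteize_alt off sz
  unfold byteize byteize_alt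
  set endB := off + sz with hendB
  by_cases h : off < endB
  · simp only [h, if_true]
    have hband := band_seven off
    have h1 := sr3_bracket off
    have h7 := sr3_bracket (off + 7)
    by_cases hmb : PySem.Int.band off 7 = 0
    · -- aligned start: A's whole loop is B's body ++ tail
      rw [if_neg (by simp [hmb])]
      exact go_aligned endB (endB - off).toNat off (le_refl _) (by omega)
        ⟨off >>> 3, by omega⟩
    · -- unaligned start: A's first iteration is B's head piece
      rw [if_pos hmb]
      set mb := PySem.Int.band off 7 with hmbd
      have hmb1 : 1 ≤ mb := by omega
      have hmb7 : mb ≤ 7 := by omega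
      have hnb : ((off + 7) >>> 3) * 8 = off + (8 - mb) := by omega
      rw [byteizeGo, if_pos h]
      simp only [← hmbd, gt_iff_lt, hnb]
      by_cases hcase : endB < off + (8 - mb)
      · -- the interval ends strictly inside the first byte: head is the only piece
        rw [if_pos hcase]
        have hhi : min (off + (8 - mb)) endB = endB := by omega
        rw [hhi, if_pos rfl]
        have he : off + (endB - off) = endB := by omega
        rw [he, byteizeGo, if_neg (by omega)]
      · rw [if_neg hcase]
        by_cases heq : off + (8 - mb) = endB
        · -- the interval ends exactly at the boundary: head is the only piece
          have hhi : min (off + (8 - mb)) endB = endB := by omega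
          rw [hhi, if_pos rfl, heq, byteizeGo, if_neg (by omega)]
          have hsz : endB - off = 8 - mb := by omega
          rw [hsz]
        · -- head piece, then the aligned rest
          have hhi : min (off + (8 - mb)) endB = off + (8 - mb) := by omega
          rw [hhi, if_neg heq]
          refine congrArg₂ _ ?_ ?_
          · have hsz : off + (8 - mb) - off = 8 - mb := by ring
            rw [hsz]
          · have h2 := sr3_bracket endB
            exact go_aligned endB (endB - (off + (8 - mb))).toNat (off + (8 - mb))
              (le_refl _) (by omega) ⟨(off >>> 3) + 1, by omega⟩
  · simp only [h, if_false]
    rw [byteizeGo, if_neg h]
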